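-- pv_equiv track=rewrite | github.com/sachinmatepatil/python-faq-practice | PythonDeepWork/salesforcecoding/user_session_time_cal_Q6.py | active_session_per_user
-- ===== SOURCE A (Python) =====
-- def active_session_per_user(logs):
--     last_active_session = {}
--     # count_active_session = {}
--
--     for log in logs:
--         user = log['user']
--         event = log['event']
--         if user not in last_active_session:
--             last_active_session[user] = 0
--         if event == 'login':
--             last_active_session[user] += 1
--         elif event == 'logout':
--             last_active_session[user] -= 1
--     return last_active_session
-- ===== SOURCE B (Python) =====
-- def active_session_per_user(logs):
--     # Phase 1: group each user's event strings, keyed by first appearance.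
--     groups = {}
--     for log in logs:
--         groups.setdefault(log['user'], []).append(log['event'])
--     # Phase 2: reduce each group to its net login/logout count.
--     return {
--         user: sum(1 if e == 'login' else -1 if e == 'logout' else 0 for e in events)
--         for user, events in groups.items()
--     }
-- ===== Notes on version B (the rewrite author's own statement) =====
-- stated objective: alternative
-- what changed: Replaces A's single-pass inline per-user accumulator with a two-phase group-then-reduce: one pass builds user->event-list groups, a second pass sums each group to its net count.
import Mathlib
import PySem

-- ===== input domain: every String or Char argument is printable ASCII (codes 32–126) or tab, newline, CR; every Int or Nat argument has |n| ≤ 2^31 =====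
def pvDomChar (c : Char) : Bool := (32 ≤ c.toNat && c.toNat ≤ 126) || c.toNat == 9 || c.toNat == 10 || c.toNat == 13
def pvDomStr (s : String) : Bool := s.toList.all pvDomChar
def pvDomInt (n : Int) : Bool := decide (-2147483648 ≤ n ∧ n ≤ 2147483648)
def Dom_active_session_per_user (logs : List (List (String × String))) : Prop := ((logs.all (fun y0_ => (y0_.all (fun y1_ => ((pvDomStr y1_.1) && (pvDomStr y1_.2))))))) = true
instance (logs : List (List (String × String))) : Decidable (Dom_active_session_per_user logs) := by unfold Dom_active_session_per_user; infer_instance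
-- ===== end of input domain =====

-- B is the same O(n) task by a different decomposition (group events per user, then reduce each
-- group to its net count) rather than A's inline per-user accumulator; return value only.

-- ===== PORT A =====
def active_session_per_user (logs : List (List (String × String))) : List (String × Int) :=
  (logs.foldl (fun d log =>
    match (PySem.Dict.mk log).get? "user", (PySem.Dict.mk log).get? "event" with
    | some user, some event =>
      let d1 := if d.contains user then d else d.insert user 0
      if event == "login" then d1.insert user (d1.getD user 0 + 1)
      else if event == "logout" then d1.insert user (d1.getD user 0 - 1)
      else d1
    | _, _ => d)  -- unreachable under Pre_ (Python raises KeyError here)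
    (PySem.Dict.empty : PySem.Dict String Int)).items

-- ===== PORT B =====
-- net login/logout count of one user's event list (the generator-sum of Source B)
def pvNet (evs : List String) : Int :=
  (evs.map (fun e => if e == "login" then (1 : Int) else if e == "logout" then -1 else 0)).sum

def active_session_per_user_alt (logs : List (List (String × String))) : List (String × Int) :=
  let groups := logs.foldl (fun g log =>
    match (PySem.Dict.mk log).get? "user" with
    | none => g  -- unreachable under Pre_ (Python raises KeyError here)
    | some user =>
      match (PySem.Dict.mk log).get? "event" with
      | none => g  -- unreachable under Pre_ (Python raises KeyError here)
      | some event => g.modify user [] (fun evs => evs ++ [event]))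
    (PySem.Dict.empty : PySem.Dict String (List String))
  groups.items.map (fun p => (p.1, pvNet p.2))

-- ===== PRECONDITION & SPEC =====
-- Pre_ excludes exactly the logs on which Python A raises KeyError: an entry missing key 'user' or 'event'.
def Pre_active_session_per_user (logs : List (List (String × String))) : Prop :=
  ∀ log ∈ logs, (PySem.Dict.mk log).contains "user" = true ∧ (PySem.Dict.mk log).contains "event" = true
instance (logs : List (List (String × String))) : Decidable (Pre_active_session_per_user logs) := by
  unfold Pre_active_session_per_user; infer_instance

def pvWitness_active_session_per_user : (List (List (String × String))) :=
  [[("user", "alice"), ("event", "login")], [("user", "bob"), ("event", "logout")], [("user", "alice"), ("event", "ping")]]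

def Spec_active_session_per_user (logs : List (List (String × String))) (out : List (String × Int)) : Prop := out = active_session_per_user_alt logs
instance (logs : List (List (String × String))) (out : List (String × Int)) : Decidable (Spec_active_session_per_user logs out) := by unfold Spec_active_session_per_user; infer_instance

-- ===== CLAIM (what is proved, stated in full; the proofs are below) =====
def Claim_equal_active_session_per_user : Prop := ∀ (logs : List (List (String × String))), Dom_active_session_per_user logs → Pre_active_session_per_user logs → Spec_active_session_per_user logs (active_session_per_user logs)

-- ===== LEMMAS AND PROOFS =====

-- A's fold step and B's fold step, named for the proofs
def stepA (d : PySem.Dict String Int) (log : List (String × String)) : PySem.Dict String Int :=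
  match (PySem.Dict.mk log).get? "user", (PySem.Dict.mk log).get? "event" with
  | some user, some event =>
    let d1 := if d.contains user then d else d.insert user 0
    if event == "login" then d1.insert user (d1.getD user 0 + 1)
    else if event == "logout" then d1.insert user (d1.getD user 0 - 1)
    else d1
  | _, _ => d

def stepB (g : PySem.Dict String (List String)) (log : List (String × String)) :
    PySem.Dict String (List String) :=
  match (PySem.Dict.mk log).get? "user" with
  | none => g
  | some user =>
    match (PySem.Dict.mk log).get? "event" with
    | none => g
    | some event => g.modify user [] (fun evs => evs ++ [event])

lemma pvNet_append_one (evs : List String) (e : String) :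
    pvNet (evs ++ [e]) =
      pvNet evs + (if e == "login" then (1 : Int) else if e == "logout" then -1 else 0) := by
  simp [pvNet]

-- one step preserves the coupling invariant
lemma step_inv (d : PySem.Dict String Int) (g : PySem.Dict String (List String))
    (log : List (String × String))
    (hk : d.keys = g.keys) (hnd : g.keys.Nodup)
    (hv : ∀ u, d.getD u 0 = pvNet (g.getD u [])) :
    (stepA d log).keys = (stepB g log).keys ∧ (stepB g log).keys.Nodup ∧
      (∀ u, (stepA d log).getD u 0 = pvNet ((stepB g log).getD u [])) := by
  unfold stepA stepB
  cases hu : (PySem.Dict.mk log).get? "user" with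
  | none => exact ⟨hk, hnd, hv⟩
  | some user =>
    cases he : (PySem.Dict.mk log).get? "event" with
    | none => exact ⟨hk, hnd, hv⟩
    | some event =>
      simp only
      have hcon : d.contains user = g.contains user := by
        rw [PySem.Dict.contains_eq_decide_mem_keys, PySem.Dict.contains_eq_decide_mem_keys, hk]
      -- keys of the modified B dict
      have hkeysB : (g.modify user [] (fun evs => evs ++ [event])).keys =
          (if g.contains user = true then g.keys else g.keys ++ [user]) := by
        rw [PySem.Dict.keys_modify]
        by_cases h : g.contains user = true
        · rw [PySem.Dict.keys_insert_of_contains _ _ h]; simp [h]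
        · rw [PySem.Dict.keys_insert_of_not_contains _ _ (eq_false_of_ne_true h)]; simp [h]
      -- the A-side dict after the membership-test step
      set d1 := (if d.contains user = true then d else d.insert user 0) with hd1
      have hkeys1 : d1.keys = (if g.contains user = true then g.keys else g.keys ++ [user]) := by
        by_cases h : g.contains user = true
        · simp [hd1, hcon, h, hk]
        · have h' : d.contains user = false := by rw [hcon]; exact eq_false_of_ne_true h
          rw [hd1]; simp only [hcon, eq_false_of_ne_true h, Bool.false_eq_true, if_false]
          rw [PySem.Dict.keys_insert_of_not_contains _ _ h', hk]
      have hcon1 : d1.contains user = true := by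
        by_cases h : d.contains user = true
        · simp [hd1, h]
        · simp [hd1, eq_false_of_ne_true h, PySem.Dict.contains_insert_self]
      have hkeysIns : ∀ v : Int, (d1.insert user v).keys = d1.keys := by
        intro v; exact PySem.Dict.keys_insert_of_contains _ _ hcon1
      have hv1 : ∀ u, d1.getD u 0 = pvNet (g.getD u []) := by
        intro u
        by_cases h : d.contains user = true
        · simp [hd1, h, hv u]
        · have h' : d.contains user = false := eq_false_of_ne_true h
          by_cases hu' : u = user
          · subst hu'
            rw [hd1]; simp only [h', Bool.false_eq_true, if_false]
            rw [PySem.Dict.getD_insert_self]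
            have hg' : g.contains u = false := by rw [← hcon]; exact h'
            rw [PySem.Dict.getD_of_not_contains _ _ hg']
            simp [pvNet]
          · rw [hd1]; simp only [h', Bool.false_eq_true, if_false]
            rw [PySem.Dict.getD_insert_of_ne _ _ _ hu', hv u]
      have hndB : (g.modify user [] (fun evs => evs ++ [event])).keys.Nodup := by
        rw [hkeysB]
        by_cases h : g.contains user = true
        · simpa [h] using hnd
        · have hmem : user ∉ g.keys := by
            intro hm
            exact h ((PySem.Dict.contains_iff_mem_keys g user).mpr hm)
          simp only [h, Bool.false_eq_true, if_false]
          exact hnd.append (List.nodup_singleton _) (by simpa using hmem)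
      have hvalB : ∀ u, (g.modify user [] (fun evs => evs ++ [event])).getD u [] =
          if u = user then g.getD user [] ++ [event] else g.getD u [] := by
        intro u
        by_cases hu' : u = user
        · subst hu'; simp [PySem.Dict.getD_modify_self]
        · rw [PySem.Dict.getD_modify_of_ne _ _ _ hu']; simp [hu']
      refine ⟨?_, hndB, ?_⟩
      · -- keys
        split_ifs with h1 h2
        · rw [hkeysIns, hkeys1, hkeysB]
        · rw [hkeysIns, hkeys1, hkeysB]
        · rw [hkeys1, hkeysB]
      · intro u
        have key_val : ∀ v : Int, (d1.insert user v).getD u 0 =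
            if u = user then v else d1.getD u 0 := by
          intro v
          by_cases hu' : u = user
          · subst hu'; simp [PySem.Dict.getD_insert_self]
          · rw [PySem.Dict.getD_insert_of_ne _ _ _ hu']; simp [hu']
        split_ifs with h1 h2
        · -- login
          rw [key_val, hvalB u]
          by_cases hu' : u = user
          · subst hu'; simp [pvNet_append_one, h1, hv1]
          · simp [hu', hv1 u]
        · -- logout
          rw [key_val, hvalB u]
          by_cases hu' : u = user
          · subst hu'
            simp [pvNet_append_one, eq_false_of_ne_true h1, h2, hv1]
            try omega
          · simp [hu', hv1 u]
        · -- other event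
          rw [hvalB u]
          by_cases hu' : u = user
          · subst hu'
            simp [pvNet_append_one, eq_false_of_ne_true h1, eq_false_of_ne_true h2, hv1]
          · simp [hu', hv1 u]

lemma fold_inv (logs : List (List (String × String)))
    (d : PySem.Dict String Int) (g : PySem.Dict String (List String))
    (hk : d.keys = g.keys) (hnd : g.keys.Nodup)
    (hv : ∀ u, d.getD u 0 = pvNet (g.getD u [])) :
    (logs.foldl stepA d).keys = (logs.foldl stepB g).keys ∧
      (logs.foldl stepB g).keys.Nodup ∧
      (∀ u, (logs.foldl stepA d).getD u 0 = pvNet ((logs.foldl stepB g).getD u [])) := by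
  induction logs generalizing d g with
  | nil => exact ⟨hk, hnd, hv⟩
  | cons log rest ih =>
    obtain ⟨h1, h2, h3⟩ := step_inv d g log hk hnd hv
    exact ih (stepA d log) (stepB g log) h1 h2 h3

-- ===== VERDICT (by name: the statement is the Claim_ definition above) =====
theorem active_session_per_user_spec : Claim_equal_active_session_per_user := by
  intro logs _hDom _hPre
  unfold Spec_active_session_per_user active_session_per_user active_session_per_user_alt
  have hmain := fold_inv logs PySem.Dict.empty PySem.Dict.empty
    (by simp [PySem.Dict.keys_empty]) (by simp [PySem.Dict.keys_empty])
    (by intro u; simp [PySem.Dict.getD_empty, pvNet])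
  obtain ⟨hk, hnd, hv⟩ := hmain
  show (logs.foldl stepA PySem.Dict.empty).items =
    ((logs.foldl stepB PySem.Dict.empty).items).map (fun p => (p.1, pvNet p.2))
  have hndA : (logs.foldl stepA PySem.Dict.empty).keys.Nodup := hk ▸ hnd
  rw [PySem.Dict.items_eq_map_keys _ hndA 0, PySem.Dict.items_eq_map_keys _ hnd [], hk,
    List.map_map]
  exact List.map_congr_left (fun u _ => by simp [hv u])
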